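-- pv_equiv track=rewrite | github.com/shafinsiddique/algorithms-datastructures | leetcode/arrays.py | leadingZeroes
-- ===== SOURCE A (Python) =====
-- def leadingZeroes(num):
--     s = str(num)
--     charArray = []
--     for items in s:
--         charArray.append(items)
--
--     counter = 0
--     while len(charArray)<7:
--         counter += 1
--         charArray.insert(0,0)
--
--
--     return "Leading Zeroes: " + str(counter)
-- ===== SOURCE B (Python) =====
-- def leadingZeroes(num):
--     return "Leading Zeroes: " + str(max(0, 7 - len(str(num))))
-- ===== Notes on version B (the rewrite author's own statement) =====
-- stated objective: simpler
-- what changed: Replaced the char-array construction and the count-up while loop with a closed-form count: the target width minus the digit-string length, floored at zero.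
import Mathlib
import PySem

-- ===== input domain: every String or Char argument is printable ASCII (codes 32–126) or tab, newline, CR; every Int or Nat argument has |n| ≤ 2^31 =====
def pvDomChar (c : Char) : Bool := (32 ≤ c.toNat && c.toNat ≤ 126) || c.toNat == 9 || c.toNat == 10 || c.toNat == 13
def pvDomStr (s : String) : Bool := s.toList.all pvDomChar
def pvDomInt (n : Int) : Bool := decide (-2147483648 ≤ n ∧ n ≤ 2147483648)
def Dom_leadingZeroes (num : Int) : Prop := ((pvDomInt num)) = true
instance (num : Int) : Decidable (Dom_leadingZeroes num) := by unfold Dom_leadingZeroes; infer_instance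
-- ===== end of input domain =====

-- B replaces A's char-array build and padding while-loop by the closed form max(0, 7 - len(str(num))); objective: simpler.

-- ===== PORT A =====
-- the while loop: while len(charArray) < 7: counter += 1; charArray.insert(0,0)
-- only the length of charArray matters for the loop, so the state is (length, counter)
def lzLoop (len counter : Nat) : Nat :=
  if len < 7 then lzLoop (len + 1) (counter + 1) else counter
termination_by 7 - len

def leadingZeroes (num : Int) : String :=
  let s := PySem.Int.toStr num
  let charArray := s.toList.foldl (fun acc c => acc ++ [c]) []
  let counter := lzLoop charArray.length 0
  "Leading Zeroes: " ++ PySem.Int.toStr (counter : Int)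

-- ===== PORT B =====
def leadingZeroes_alt (num : Int) : String :=
  "Leading Zeroes: " ++ PySem.Int.toStr (max 0 (7 - ((PySem.Int.toStr num).toList.length : Int)))

-- ===== PRECONDITION & SPEC =====
def Spec_leadingZeroes (num : Int) (out : String) : Prop := out = leadingZeroes_alt num
instance (num : Int) (out : String) : Decidable (Spec_leadingZeroes num out) := by unfold Spec_leadingZeroes; infer_instance

-- ===== CLAIM (what is proved, stated in full; the proofs are below) =====
def Claim_equal_leadingZeroes : Prop := ∀ (num : Int), Dom_leadingZeroes num → Spec_leadingZeroes num (leadingZeroes num)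

-- ===== LEMMAS AND PROOFS =====
theorem foldl_append_id {α : Type} (l acc : List α) :
    l.foldl (fun acc c => acc ++ [c]) acc = acc ++ l := by
  induction l generalizing acc with
  | nil => simp [List.foldl]
  | cons x xs ih => simp [List.foldl, ih]

theorem lzLoop_eq (len counter : Nat) : lzLoop len counter = counter + (7 - len) := by
  fun_induction lzLoop len counter with
  | case1 len counter h ih => omega
  | case2 len counter h => omega

-- ===== VERDICT (by name: the statement is the Claim_ definition above) =====
theorem leadingZeroes_spec : Claim_equal_leadingZeroes := by
  intro num _
  show _ = _
  simp only [leadingZeroes, leadingZeroes_alt, foldl_append_id, lzLoop_eq, List.nil_append]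
  congr 1
  congr 1
  omega
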